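-- pv_equiv track=rewrite | github.com/cpennycuick/gitlabform | gitlabform/configuration/core.py | is_skipped_case_insensitively
-- ===== SOURCE A (Python) =====
-- def is_skipped_case_insensitively(an_array: list, item: str) -> bool:
--     """
--     :return: if item is defined in the list to be skipped
--     """
--     item = item.lower()
--
--     for list_element in an_array:
--         list_element = list_element.lower()
--
--         if list_element == item:
--             return True
--
--         if (
--             list_element.endswith("/*")
--             and item.startswith(list_element[:-2])
--             and len(item) >= len(list_element[:-2])
--         ):
--             return True
--
--     return False
-- ===== SOURCE B (Python) =====
-- def is_skipped_case_insensitively(an_array: list, item: str) -> bool: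
--     """
--     :return: if item is defined in the list to be skipped
--     """
--     lowered = {e.lower() for e in an_array}
--     wildcards = {w[:-2] for w in lowered if w.endswith("/*")}
--     item = item.lower()
--     return item in lowered or any(item[:k] in wildcards for k in {len(w) for w in wildcards})
-- ===== Notes on version B (the rewrite author's own statement) =====
-- stated objective: alternative
-- what changed: Inverts the lookup direction: instead of scanning the array and testing each element against the item (exact ==, endswith, startswith), B indexes the array into two hash sets (lowercased elements, and stems of '/*' wildcards) plus the set of distinct stem lengths, then answers by set-membership tests on the item and on its prefixes at those lengths - no per-element comparison or startswith at query time.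
import Mathlib
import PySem

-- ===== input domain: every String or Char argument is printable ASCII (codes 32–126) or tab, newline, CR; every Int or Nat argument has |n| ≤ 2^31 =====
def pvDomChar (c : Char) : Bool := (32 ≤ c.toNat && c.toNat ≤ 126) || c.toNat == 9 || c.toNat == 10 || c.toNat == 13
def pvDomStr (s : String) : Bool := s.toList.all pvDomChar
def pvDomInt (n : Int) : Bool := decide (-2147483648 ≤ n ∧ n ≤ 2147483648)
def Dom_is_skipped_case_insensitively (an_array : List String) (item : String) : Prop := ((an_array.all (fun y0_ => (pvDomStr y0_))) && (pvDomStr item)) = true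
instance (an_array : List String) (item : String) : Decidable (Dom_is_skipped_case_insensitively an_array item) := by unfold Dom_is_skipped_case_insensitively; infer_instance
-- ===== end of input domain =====

-- B inverts the lookup direction: it indexes the array into two sets (lowered elements, wildcard stems) and enumerates the ITEM's prefixes with set lookups; equal return value proved.
-- ===== PORT A =====
def isSkippedGoA (it : String) : List String → Bool
  | [] => false
  | list_element :: rest =>
    let le := PySem.Str.lower list_element
    if le == it then true
    else if PySem.Str.endswith le "/*"
            && PySem.Str.startswith it (PySem.Str.slice le none (some (-2)))
            && decide (PySem.Str.len it ≥ PySem.Str.len (PySem.Str.slice le none (some (-2)))) then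
      true
    else isSkippedGoA it rest

def is_skipped_case_insensitively (an_array : List String) (item : String) : Bool :=
  isSkippedGoA (PySem.Str.lower item) an_array

-- ===== PORT B =====
def is_skipped_case_insensitively_alt (an_array : List String) (item : String) : Bool :=
  let lowered := PySem.Set.ofList (an_array.map PySem.Str.lower)
  let wildcards := PySem.Set.ofList (lowered.filterMap
      (fun w => if PySem.Str.endswith w "/*" then some (PySem.Str.slice w none (some (-2))) else none))
  let it := PySem.Str.lower item
  PySem.Set.contains lowered it ||
    (PySem.Set.ofList (wildcards.map PySem.Str.len)).any
      (fun k => PySem.Set.contains wildcards (PySem.Str.slice it none (some k)))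

-- ===== PRECONDITION & SPEC =====
def Spec_is_skipped_case_insensitively (an_array : List String) (item : String) (out : Bool) : Prop := out = is_skipped_case_insensitively_alt an_array item
instance (an_array : List String) (item : String) (out : Bool) : Decidable (Spec_is_skipped_case_insensitively an_array item out) := by unfold Spec_is_skipped_case_insensitively; infer_instance

-- ===== CLAIM (what is proved, stated in full; the proofs are below) =====
def Claim_equal_is_skipped_case_insensitively : Prop := ∀ (an_array : List String) (item : String), Dom_is_skipped_case_insensitively an_array item → Spec_is_skipped_case_insensitively an_array item (is_skipped_case_insensitively an_array item)

-- ===== LEMMAS AND PROOFS =====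

-- a string matches an element exactly or via its '/*' wildcard
def pvMatches (it e : String) : Prop :=
  PySem.Str.lower e = it ∨
    (PySem.Str.endswith (PySem.Str.lower e) "/*" = true ∧
     PySem.Str.startswith it (PySem.Str.slice (PySem.Str.lower e) none (some (-2))) = true)

theorem startswith_len_le (it p : String) (h : PySem.Str.startswith it p = true) :
    PySem.Str.len p ≤ PySem.Str.len it := by
  have h' : p.toList <+: it.toList :=
    (PySem.Chars.startswith_iff it.toList p.toList).mp (by simpa using h)
  have := h'.length_le
  simp only [PySem.Str.len_eq]
  exact_mod_cast this

theorem goA_iff (it : String) (l : List String) :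
    isSkippedGoA it l = true ↔ ∃ e ∈ l, pvMatches it e := by
  induction l with
  | nil => simp [isSkippedGoA]
  | cons e rest ih =>
    simp only [isSkippedGoA]
    by_cases heq : PySem.Str.lower e = it
    · simp [heq, pvMatches]
    · have hbeq : (PySem.Str.lower e == it) = false := by simpa using heq
      rw [hbeq]
      simp only [Bool.false_eq_true, if_false]
      by_cases hw : PySem.Str.endswith (PySem.Str.lower e) "/*" = true ∧
          PySem.Str.startswith it (PySem.Str.slice (PySem.Str.lower e) none (some (-2))) = true
      · have hlen := startswith_len_le it _ hw.2
        simp only [hw.1, hw.2, decide_eq_true hlen, Bool.and_self, if_true]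
        simp only [true_iff]
        exact ⟨e, by simp, Or.inr hw⟩
      · have hcond : (PySem.Str.endswith (PySem.Str.lower e) "/*"
            && PySem.Str.startswith it (PySem.Str.slice (PySem.Str.lower e) none (some (-2)))
            && decide (PySem.Str.len it ≥ PySem.Str.len (PySem.Str.slice (PySem.Str.lower e) none (some (-2))))) = false := by
          rcases Decidable.not_and_iff_or_not.mp hw with h1 | h1
          · rw [Bool.eq_false_iff.mpr h1, Bool.false_and, Bool.false_and]
          · rw [Bool.eq_false_iff.mpr h1, Bool.and_false, Bool.false_and]
        rw [hcond]
        simp only [Bool.false_eq_true, if_false, ih, List.mem_cons]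
        constructor
        · rintro ⟨x, hx, hm⟩; exact ⟨x, Or.inr hx, hm⟩
        · rintro ⟨x, hx | hx, hm⟩
          · subst hx
            rcases hm with hm | hm
            · exact absurd hm heq
            · exact absurd hm hw
          · exact ⟨x, hx, hm⟩

theorem contains_ofList_iff {α : Type} [BEq α] [LawfulBEq α] (xs : List α) (y : α) :
    PySem.Set.contains (PySem.Set.ofList xs) y = true ↔ y ∈ xs := by
  simp only [PySem.Set.contains, List.contains_iff_mem]
  exact PySem.Set.mem_ofList xs y

-- a nonneg-length slice that equals p makes p a prefix
theorem startswith_of_slice (s p : String) (k : Int) (h0 : 0 ≤ k)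
    (h : PySem.Str.slice s none (some k) = p) : PySem.Str.startswith s p = true := by
  simp only [PySem.Str.startswith_eq, PySem.Chars.startswith_iff]
  have hl : (PySem.Str.slice s none (some k)).toList = p.toList := by rw [h]
  rw [PySem.Str.toList_slice, PySem.Chars.slice_eq_listSlice,
      PySem.List.slice_to _ h0] at hl
  rw [← hl]
  exact List.take_prefix _ _

-- slicing s at a prefix's own length recovers the prefix
theorem slice_len_of_startswith (s p : String) (h : PySem.Str.startswith s p = true) :
    PySem.Str.slice s none (some (PySem.Str.len p)) = p := by
  have hpre : p.toList <+: s.toList :=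
    (PySem.Chars.startswith_iff s.toList p.toList).mp (by simpa using h)
  apply String.toList_inj.mp
  rw [PySem.Str.toList_slice, PySem.Chars.slice_eq_listSlice, PySem.Str.len_eq,
      PySem.List.slice_to_natCast]
  exact (List.prefix_iff_eq_take.mp hpre).symm

theorem alt_iff (l : List String) (item : String) :
    is_skipped_case_insensitively_alt l item = true ↔
      ∃ e ∈ l, pvMatches (PySem.Str.lower item) e := by
  unfold is_skipped_case_insensitively_alt
  simp only [Bool.or_eq_true, List.any_eq_true, contains_ofList_iff]
  constructor
  · rintro (h | ⟨k, hk, hc⟩)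
    · obtain ⟨e, he, hle⟩ := List.mem_map.mp h
      exact ⟨e, he, Or.inl hle⟩
    · obtain ⟨w', hw', hlen⟩ := List.mem_map.mp ((PySem.Set.mem_ofList _ _).mp hk)
      obtain ⟨w, hw, hval⟩ := List.mem_filterMap.mp hc
      split_ifs at hval with hend
      · obtain ⟨e, he, hle⟩ := List.mem_map.mp ((PySem.Set.mem_ofList _ w).mp hw)
        subst hle
        refine ⟨e, he, Or.inr ⟨hend, ?_⟩⟩
        refine startswith_of_slice _ _ k ?_ (Option.some.inj hval).symm
        rw [← hlen, PySem.Str.len_eq]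
        positivity
  · rintro ⟨e, he, hm | ⟨hend, hpre⟩⟩
    · exact Or.inl (List.mem_map.mpr ⟨e, he, hm⟩)
    · right
      have hpmem : PySem.Str.slice (PySem.Str.lower e) none (some (-2)) ∈
          (PySem.Set.ofList (l.map PySem.Str.lower)).filterMap
            (fun w => if PySem.Str.endswith w "/*" = true
              then some (PySem.Str.slice w none (some (-2))) else none) :=
        List.mem_filterMap.mpr ⟨PySem.Str.lower e,
          (PySem.Set.mem_ofList _ _).mpr (List.mem_map.mpr ⟨e, he, rfl⟩),
          by rw [if_pos hend]⟩
      refine ⟨PySem.Str.len (PySem.Str.slice (PySem.Str.lower e) none (some (-2))),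
        (PySem.Set.mem_ofList _ _).mpr (List.mem_map.mpr ⟨_, (PySem.Set.mem_ofList _ _).mpr hpmem, rfl⟩), ?_⟩
      rw [slice_len_of_startswith _ _ hpre]
      exact hpmem

-- ===== VERDICT (by name: the statement is the Claim_ definition above) =====
theorem is_skipped_case_insensitively_spec : Claim_equal_is_skipped_case_insensitively := by
  intro an_array item _
  unfold Spec_is_skipped_case_insensitively is_skipped_case_insensitively
  rw [Bool.eq_iff_iff, goA_iff, alt_iff]
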